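-- pv_equiv track=rewrite | github.com/EddyTheAnimator1/Rec-Room-Patches | Release.py | choose_manifest_folder
-- ===== SOURCE A (Python) =====
-- def choose_manifest_folder(manifest_id: str, folders: list[str]) -> str:
--     exact = [folder for folder in folders if folder == manifest_id]
--     if exact:
--         return exact[0]
--
--     startswith = [folder for folder in folders if folder.startswith(manifest_id + " ")]
--     if startswith:
--         startswith.sort(key=len)
--         return startswith[0]
--
--     folders.sort(key=lambda item: (len(item), item.lower()))
--     return folders[0]
-- ===== SOURCE B (Python) =====
-- def choose_manifest_folder(manifest_id: str, folders: list[str]) -> str: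
--     prefix = manifest_id + " "
--     best = None
--     for folder in folders:
--         if folder == manifest_id:
--             return folder
--         if folder.startswith(prefix) and (best is None or len(folder) < len(best)):
--             best = folder
--     if best is not None:
--         return best
--     folders.sort(key=lambda item: (len(item), item.lower()))
--     return folders[0]
-- ===== Notes on version B (the rewrite author's own statement) =====
-- stated objective: faster
-- what changed: Replaces A's two filter passes plus a stable sort of the prefix candidates with one running-best scan that returns immediately on an exact match and keeps the first strictly-shortest prefixed folder; only the final fallback still sorts in place.
import Mathlib
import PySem

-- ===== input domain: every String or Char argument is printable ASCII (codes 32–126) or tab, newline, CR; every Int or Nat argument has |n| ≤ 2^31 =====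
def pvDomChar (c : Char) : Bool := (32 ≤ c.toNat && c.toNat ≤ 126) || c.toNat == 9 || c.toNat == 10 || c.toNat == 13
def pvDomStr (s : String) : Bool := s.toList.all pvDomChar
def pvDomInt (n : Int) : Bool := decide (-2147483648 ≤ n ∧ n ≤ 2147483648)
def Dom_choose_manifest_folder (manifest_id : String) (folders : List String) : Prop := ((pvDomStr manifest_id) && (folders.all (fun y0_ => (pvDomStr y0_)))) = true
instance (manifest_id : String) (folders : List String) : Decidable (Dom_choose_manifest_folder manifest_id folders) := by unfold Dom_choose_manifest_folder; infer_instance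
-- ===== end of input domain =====

-- B replaces A's two filter passes + stable sort of the prefix candidates by one running-best
-- scan (measured faster in a timing run). Equivalence is about the RETURN value; A sorts
-- `folders` in place in its fallback branch and Source B performs the same mutation there.

-- ===== PORT A =====
def choose_manifest_folder (manifest_id : String) (folders : List String) : String :=
  let exact := folders.filter (fun folder => folder == manifest_id)
  match exact with
  | e :: _ => e
  | [] =>
    let startswith := folders.filter (fun folder => PySem.Str.startswith folder (manifest_id ++ " "))
    match PySem.List.sorted startswith (fun f => PySem.Str.len f) with
    | s :: _ => s
    | [] =>
      -- folders.sort(key=lambda item: (len(item), item.lower())); return folders[0]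
      match PySem.List.sorted2 folders (fun item => PySem.Str.len item) (fun item => PySem.Str.lower item) with
      | h :: _ => h
      | [] => ""   -- folders == []: Python raises IndexError here; excluded by Pre_

-- ===== PORT B =====
-- the single pass of Source B: return the first exact match at once, otherwise keep the first
-- strictly-shortest folder starting with `prefix_`
def pvAltGo (manifest_id prefix_ : String) (best : Option String) : List String → Option String
  | [] => best
  | folder :: rest =>
    if folder == manifest_id then some folder
    else if PySem.Str.startswith folder prefix_ &&
            (match best with
             | none => true
             | some b => decide (PySem.Str.len folder < PySem.Str.len b)) then
      pvAltGo manifest_id prefix_ (some folder) rest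
    else
      pvAltGo manifest_id prefix_ best rest

def choose_manifest_folder_alt (manifest_id : String) (folders : List String) : String :=
  match pvAltGo manifest_id (manifest_id ++ " ") none folders with
  | some best => best
  | none =>
    -- folders.sort(key=lambda item: (len(item), item.lower())); return folders[0]
    match PySem.List.sorted2 folders (fun item => PySem.Str.len item) (fun item => PySem.Str.lower item) with
    | h :: _ => h
    | [] => ""   -- folders == []: Python raises IndexError here; excluded by Pre_

-- ===== PRECONDITION & SPEC =====
-- A raises IndexError exactly when folders == [] (the fallback indexes folders[0]); excluded.
def Pre_choose_manifest_folder (manifest_id : String) (folders : List String) : Prop := folders ≠ []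
instance (manifest_id : String) (folders : List String) : Decidable (Pre_choose_manifest_folder manifest_id folders) := by unfold Pre_choose_manifest_folder; infer_instance
def pvWitness_choose_manifest_folder : String × List String := ("x", ["x y", "ab"])

def Spec_choose_manifest_folder (manifest_id : String) (folders : List String) (out : String) : Prop := out = choose_manifest_folder_alt manifest_id folders
instance (manifest_id : String) (folders : List String) (out : String) : Decidable (Spec_choose_manifest_folder manifest_id folders out) := by unfold Spec_choose_manifest_folder; infer_instance

-- ===== CLAIM (what is proved, stated in full; the proofs are below) =====
def Claim_equal_choose_manifest_folder : Prop := ∀ (manifest_id : String) (folders : List String), Dom_choose_manifest_folder manifest_id folders → Pre_choose_manifest_folder manifest_id folders → Spec_choose_manifest_folder manifest_id folders (choose_manifest_folder manifest_id folders)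

-- ===== LEMMAS AND PROOFS =====

-- the running-best step of Source B, as a fold step (strict '<' keeps the FIRST shortest)
def pvStep (b : Option String) (folder : String) : Option String :=
  if (match b with
      | none => true
      | some h => decide (PySem.Str.len folder < PySem.Str.len h)) then some folder else b

-- if some element of l equals manifest_id, pvAltGo returns the first such element
theorem pvAltGo_exact (manifest_id prefix_ : String) :
    ∀ (l : List String) (best : Option String) (e : String) (t : List String),
      l.filter (fun folder => folder == manifest_id) = e :: t →
      pvAltGo manifest_id prefix_ best l = some e := by
  intro l
  induction l with
  | nil => intro best e t h; simp [List.filter] at h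
  | cons f rest ih =>
    intro best e t h
    by_cases hf : f = manifest_id
    · subst hf
      simp [List.filter] at h
      simp [pvAltGo, h.1]
    · simp only [List.filter_cons, beq_iff_eq, hf, if_false] at h
      simp only [pvAltGo, beq_iff_eq, hf, if_false]
      cases best with
      | none =>
        by_cases hc : (PySem.Str.startswith f prefix_ && true) = true
        · rw [if_pos hc]; exact ih _ e t h
        · rw [if_neg hc]; exact ih _ e t h
      | some b =>
        by_cases hc : (PySem.Str.startswith f prefix_ && decide (PySem.Str.len f < PySem.Str.len b)) = true
        · rw [if_pos hc]; exact ih _ e t h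
        · rw [if_neg hc]; exact ih _ e t h

-- with no exact match, pvAltGo is the running-best fold over the prefix-filtered list
theorem pvAltGo_no_exact (manifest_id prefix_ : String) :
    ∀ (l : List String) (best : Option String),
      l.filter (fun folder => folder == manifest_id) = [] →
      pvAltGo manifest_id prefix_ best l =
        (l.filter (fun folder => PySem.Str.startswith folder prefix_)).foldl pvStep best := by
  intro l
  induction l with
  | nil => intro best _; simp [pvAltGo]
  | cons f rest ih =>
    intro best h
    have hf : ¬ (f = manifest_id) := by
      intro he
      simp only [List.filter_cons, beq_iff_eq, he, if_true] at h
      exact List.cons_ne_nil _ _ h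
    simp only [List.filter_cons, beq_iff_eq, hf, if_false] at h
    by_cases hs : PySem.Str.startswith f prefix_ = true
    · simp only [List.filter_cons, hs, if_true, List.foldl_cons]
      simp only [pvAltGo, beq_iff_eq, hf, if_false]
      cases best with
      | none =>
        rw [if_pos (by rw [Bool.and_eq_true]; exact ⟨hs, rfl⟩), ih _ h]
        rfl
      | some b =>
        by_cases hc : PySem.Str.len f < PySem.Str.len b
        · rw [if_pos (by rw [Bool.and_eq_true]; exact ⟨hs, decide_eq_true hc⟩), ih _ h]
          congr 1
          simp only [pvStep, decide_eq_true_eq]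
          rw [if_pos hc]
        · rw [if_neg (by rw [Bool.and_eq_true]; exact fun hcon => hc (of_decide_eq_true hcon.2)), ih _ h]
          congr 1
          simp only [pvStep, decide_eq_true_eq]
          rw [if_neg hc]
    · simp only [List.filter_cons, hs]
      simp only [pvAltGo, beq_iff_eq, hf, if_false]
      cases best with
      | none =>
        rw [if_neg (by simp only [Bool.and_eq_true]; exact fun hcon => hs hcon.1)]
        exact ih _ h
      | some b =>
        rw [if_neg (by simp only [Bool.and_eq_true]; exact fun hcon => hs hcon.1)]
        exact ih _ h

-- head of insertBy with a strict 'before': the smaller of x and the old head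
theorem pvInsertBy_head (before : String → String → Bool) (x : String) (ys : List String) :
    (PySem.List.insertBy before x ys).head? =
      some (match ys.head? with
            | none => x
            | some y => if before x y then x else y) := by
  cases ys with
  | nil => simp [PySem.List.insertBy]
  | cons y t =>
    simp only [PySem.List.insertBy]
    split <;> simp [*]

-- head of the insertion-sort fold IS the running-best fold
theorem pvFoldl_insertBy_head (before : String → String → Bool) :
    ∀ (l : List String) (acc : List String),
      (l.foldl (fun acc x => PySem.List.insertBy before x acc) acc).head? =
        l.foldl (fun b f =>
          if (match b with | none => true | some h => before f h) then some f else b) acc.head? := by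
  intro l
  induction l with
  | nil => intro acc; rfl
  | cons x rest ih =>
    intro acc
    rw [List.foldl_cons, List.foldl_cons, ih, pvInsertBy_head]
    cases acc with
    | nil => simp
    | cons a t =>
      simp only [List.head?]
      split <;> simp_all

-- the sorted-by-len head equals the running-best fold with pvStep
theorem pvSorted_head (sw : List String) :
    (PySem.List.sorted sw (fun f => PySem.Str.len f)).head? = sw.foldl pvStep none := by
  rw [PySem.List.sorted_eq_foldl_insertBy,
      pvFoldl_insertBy_head (fun a b => decide (PySem.Str.len a < PySem.Str.len b))]
  simp only [List.head?]
  apply PySem.List.foldl_congr_mem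
  intro b f _
  cases b <;> simp [pvStep]

-- ===== VERDICT (by name: the statement is the Claim_ definition above) =====
theorem choose_manifest_folder_spec : Claim_equal_choose_manifest_folder := by
  intro manifest_id folders _ _
  unfold Spec_choose_manifest_folder choose_manifest_folder choose_manifest_folder_alt
  cases hfe : folders.filter (fun folder => folder == manifest_id) with
  | cons e t =>
    rw [pvAltGo_exact manifest_id (manifest_id ++ " ") folders none e t hfe]
  | nil =>
    rw [pvAltGo_no_exact manifest_id (manifest_id ++ " ") folders none hfe]
    cases hsw : PySem.List.sorted (folders.filter (fun folder => PySem.Str.startswith folder (manifest_id ++ " "))) (fun f => PySem.Str.len f) with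
    | cons s t =>
      have := pvSorted_head (folders.filter (fun folder => PySem.Str.startswith folder (manifest_id ++ " ")))
      rw [hsw] at this
      simp only [List.head?] at this
      rw [← this]
      simp only [hsw]
    | nil =>
      have hempty : folders.filter (fun folder => PySem.Str.startswith folder (manifest_id ++ " ")) = [] :=
        (PySem.List.sorted_eq_nil_iff _ _ _).1 hsw
      rw [hempty]
      rfl
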